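-- pv_equiv track=rewrite | github.com/PrefectHQ/prefect | src/prefect/_sdk/schema_converter.py | _split_union_top_level
-- ===== SOURCE A (Python) =====
-- def _split_union_top_level(type_str: str) -> list[str]:
--     """
--     Split a union type string on " | " only at the top level.
--
--     This is bracket- and quote-aware, so it won't split inside:
--     - Brackets: list[str | int] stays intact
--     - Quotes: Literal['a | b'] stays intact
--
--     Args:
--         type_str: A type annotation string, possibly containing unions.
--
--     Returns:
--         List of individual type parts.
--     """
--     parts: list[str] = []
--     current: list[str] = []
--     bracket_depth = 0
--     in_single_quote = False
--     in_double_quote = False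
--     i = 0
--
--     while i < len(type_str):
--         char = type_str[i]
--
--         # Handle escape sequences inside quotes
--         if (in_single_quote or in_double_quote) and char == "\\":
--             current.append(char)
--             if i + 1 < len(type_str):
--                 current.append(type_str[i + 1])
--                 i += 2
--                 continue
--             i += 1
--             continue
--
--         # Track quote state
--         if char == "'" and not in_double_quote:
--             in_single_quote = not in_single_quote
--             current.append(char)
--         elif char == '"' and not in_single_quote:
--             in_double_quote = not in_double_quote
--             current.append(char)
--         # Track bracket depth (only when not in quotes)
--         elif char == "[" and not in_single_quote and not in_double_quote:
--             bracket_depth += 1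
--             current.append(char)
--         elif char == "]" and not in_single_quote and not in_double_quote:
--             bracket_depth -= 1
--             current.append(char)
--         # Check for " | " at top level
--         elif (
--             char == " "
--             and bracket_depth == 0
--             and not in_single_quote
--             and not in_double_quote
--             and type_str[i : i + 3] == " | "
--         ):
--             # Found a top-level union separator
--             part = "".join(current).strip()
--             if part:
--                 parts.append(part)
--             current = []
--             i += 3  # Skip " | "
--             continue
--         else:
--             current.append(char)
--
--         i += 1
--
--     # Add the last part
--     part = "".join(current).strip()
--     if part:
--         parts.append(part)
--
--     return parts
-- ===== SOURCE B (Python) =====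
-- def _split_union_top_level(type_str: str) -> list[str]:
--     # One pass records top-level " | " segment boundaries (skip counter replaces
--     # A's manual index jumps); a second pass slices, strips and filters.
--     bounds = []
--     start = 0
--     depth = 0
--     sq = dq = False
--     skip = 0
--     for i, ch in enumerate(type_str):
--         if skip:
--             skip -= 1
--             continue
--         if (sq or dq) and ch == "\\":
--             skip = 1
--         elif ch == "'" and not dq:
--             sq = not sq
--         elif ch == '"' and not sq:
--             dq = not dq
--         elif ch == "[" and not sq and not dq:
--             depth += 1
--         elif ch == "]" and not sq and not dq:
--             depth -= 1
--         elif ch == " " and depth == 0 and not sq and not dq and type_str[i : i + 3] == " | ":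
--             bounds.append((start, i))
--             start = i + 3
--             skip = 2
--     bounds.append((start, len(type_str)))
--     out = []
--     for s, e in bounds:
--         part = type_str[s:e].strip()
--         if part:
--             out.append(part)
--     return out
-- ===== Notes on version B (the rewrite author's own statement) =====
-- stated objective: faster
-- what changed: B replaces A's per-character buffer accumulation and manual index jumps with a single enumerate pass that only records (start, end) segment boundaries via a skip counter, then a second pass that slices, strips and filters the segments.
import Mathlib
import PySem

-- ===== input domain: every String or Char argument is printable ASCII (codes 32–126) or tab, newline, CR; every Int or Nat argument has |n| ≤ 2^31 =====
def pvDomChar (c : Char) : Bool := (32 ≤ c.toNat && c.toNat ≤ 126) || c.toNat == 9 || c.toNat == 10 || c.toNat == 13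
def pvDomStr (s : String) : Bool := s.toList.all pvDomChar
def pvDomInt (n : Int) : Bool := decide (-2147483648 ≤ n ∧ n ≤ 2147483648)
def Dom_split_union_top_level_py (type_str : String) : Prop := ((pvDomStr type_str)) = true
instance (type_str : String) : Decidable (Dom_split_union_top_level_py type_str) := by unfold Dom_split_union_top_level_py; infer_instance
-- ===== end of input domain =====

-- B records top-level " | " segment boundaries in one pass (a skip counter replaces A's
-- manual index jumps and per-character buffer), then slices/strips/filters; measured faster (constant factor).

-- ===== PORT A =====
-- A's while-loop: character accumulator `current`, parts appended as found.
def pvLoopA : List Char → List Char → Int → Bool → Bool → List String → List String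
  | [], current, _, _, _, parts =>
      -- "".join(current).strip(); if part: parts.append(part)
      let part := PySem.Chars.strip current
      if part = [] then parts else parts ++ [String.ofList part]
  | c :: rs, current, depth, sq, dq, parts =>
      if (sq = true ∨ dq = true) ∧ c = '\\' then
        match rs with
        | d :: rs' => pvLoopA rs' (current ++ [c, d]) depth sq dq parts
        | [] => pvLoopA [] (current ++ [c]) depth sq dq parts
      else if c = '\'' ∧ dq = false then
        pvLoopA rs (current ++ [c]) depth (!sq) dq parts
      else if c = '"' ∧ sq = false then
        pvLoopA rs (current ++ [c]) depth sq (!dq) parts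
      else if c = '[' ∧ sq = false ∧ dq = false then
        pvLoopA rs (current ++ [c]) (depth + 1) sq dq parts
      else if c = ']' ∧ sq = false ∧ dq = false then
        pvLoopA rs (current ++ [c]) (depth - 1) sq dq parts
      else if c = ' ' ∧ depth = 0 ∧ sq = false ∧ dq = false ∧ (c :: rs).take 3 = [' ', '|', ' '] then
        -- type_str[i:i+3] == " | " : the clamped slice is `take 3` of the remaining chars
        let part := PySem.Chars.strip current
        pvLoopA (rs.drop 2) [] depth sq dq (if part = [] then parts else parts ++ [String.ofList part])
      else
        pvLoopA rs (current ++ [c]) depth sq dq parts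
  termination_by rest => rest.length
  decreasing_by all_goals simp_all

def split_union_top_level_py (type_str : String) : List String :=
  pvLoopA type_str.toList [] 0 false false []

-- ===== PORT B =====
-- state = (skip, depth, in_single_quote, in_double_quote, start, bounds)
def pvStepB (s : List Char) (st : Int × Int × Bool × Bool × Int × List (Int × Int))
    (p : Int × Char) : Int × Int × Bool × Bool × Int × List (Int × Int) :=
  let (skip, depth, sq, dq, start, bounds) := st
  let (i, ch) := p
  if skip ≠ 0 then (skip - 1, depth, sq, dq, start, bounds)
  else if (sq = true ∨ dq = true) ∧ ch = '\\' then (1, depth, sq, dq, start, bounds)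
  else if ch = '\'' ∧ dq = false then (skip, depth, !sq, dq, start, bounds)
  else if ch = '"' ∧ sq = false then (skip, depth, sq, !dq, start, bounds)
  else if ch = '[' ∧ sq = false ∧ dq = false then (skip, depth + 1, sq, dq, start, bounds)
  else if ch = ']' ∧ sq = false ∧ dq = false then (skip, depth - 1, sq, dq, start, bounds)
  else if ch = ' ' ∧ depth = 0 ∧ sq = false ∧ dq = false ∧
      PySem.List.slice s (some i) (some (i + 3)) = [' ', '|', ' '] then
    (2, depth, sq, dq, i + 3, bounds ++ [(start, i)])
  else st

-- second pass: slice, strip, keep non-empty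
def pvEmitB (s : List Char) (out : List String) (p : Int × Int) : List String :=
  let part := PySem.Chars.strip (PySem.List.slice s (some p.1) (some p.2))
  if part = [] then out else out ++ [String.ofList part]

def split_union_top_level_py_alt (type_str : String) : List String :=
  let s := type_str.toList
  let st := (PySem.List.enumerate s 0).foldl (pvStepB s) (0, 0, false, false, 0, [])
  let bounds := st.2.2.2.2.2 ++ [(st.2.2.2.2.1, (s.length : Int))]
  bounds.foldl (pvEmitB s) []

-- ===== PRECONDITION & SPEC =====
def Spec_split_union_top_level_py (type_str : String) (out : List String) : Prop := out = split_union_top_level_py_alt type_str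
instance (type_str : String) (out : List String) : Decidable (Spec_split_union_top_level_py type_str out) := by unfold Spec_split_union_top_level_py; infer_instance

-- ===== CLAIM (what is proved, stated in full; the proofs are below) =====
def Claim_equal_split_union_top_level_py : Prop := ∀ (type_str : String), Dom_split_union_top_level_py type_str → Spec_split_union_top_level_py type_str (split_union_top_level_py type_str)

-- ===== LEMMAS AND PROOFS =====

theorem pv_take_ext (s : List Char) (start k : Nat) (c : Char) (t : List Char)
    (h1 : start ≤ k) (h2 : s.drop k = c :: t) :
    (s.drop start).take (k + 1 - start) = (s.drop start).take (k - start) ++ [c] := by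
  have hk : (s.drop start)[k - start]? = some c := by
    rw [List.getElem?_drop]
    have : start + (k - start) = k := by omega
    rw [this]
    have h7 : s[k]? = (s.drop k)[0]? := by rw [List.getElem?_drop, Nat.add_zero]
    rw [h7, h2]
    rfl
  have : k + 1 - start = (k - start) + 1 := by omega
  rw [this, List.take_add_one, hk]
  rfl

theorem pv_nil (s : List Char) (current : List Char) (k start : Nat) (depth : Int)
    (sq dq : Bool) (parts : List String) (bounds : List (Int × Int))
    (h2 : s.drop k = []) (h3 : start ≤ k)
    (h4 : current = (s.drop start).take (k - start))
    (h5 : parts = bounds.foldl (pvEmitB s) []) :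
    pvLoopA [] current depth sq dq parts =
      (bounds ++ [((start : Int), (s.length : Int))]).foldl (pvEmitB s) [] := by
  have hcur : PySem.List.slice s (some (start : Int)) (some (s.length : Int)) = current := by
    rw [PySem.List.slice_natCast, h4]
    have hlen : s.length ≤ k := by
      have := List.drop_eq_nil_iff.mp h2
      omega
    have h6 : (s.drop start).length = s.length - start := by simp
    rw [List.take_of_length_le (by omega), List.take_of_length_le (by omega)]
  rw [List.foldl_append, ← h5, List.foldl_cons, List.foldl_nil]
  simp only [pvLoopA, pvEmitB, hcur]

def pvFinish (s : List Char) (st : Int × Int × Bool × Bool × Int × List (Int × Int)) :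
    List String :=
  (st.2.2.2.2.2 ++ [(st.2.2.2.2.1, (s.length : Int))]).foldl (pvEmitB s) []

theorem pv_main (s : List Char) :
    ∀ (n : Nat) (rest current : List Char) (k start : Nat) (depth : Int) (sq dq : Bool)
      (parts : List String) (bounds : List (Int × Int)),
      rest.length ≤ n →
      s.drop k = rest → start ≤ k →
      current = (s.drop start).take (k - start) →
      parts = bounds.foldl (pvEmitB s) [] →
      pvLoopA rest current depth sq dq parts =
        pvFinish s ((PySem.List.enumerate rest (k : Int)).foldl (pvStepB s)
            (0, depth, sq, dq, (start : Int), bounds)) := by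
  intro n
  induction n with
  | zero =>
    intro rest current k start depth sq dq parts bounds h1 h2 h3 h4 h5
    have hr : rest = [] := List.eq_nil_of_length_eq_zero (Nat.le_zero.mp h1)
    subst hr
    simpa [PySem.List.enumerate, pvFinish] using
      pv_nil s current k start depth sq dq parts bounds h2 h3 h4 h5
  | succ n IH =>
    intro rest current k start depth sq dq parts bounds h1 h2 h3 h4 h5
    cases rest with
    | nil =>
      simpa [PySem.List.enumerate, pvFinish] using
        pv_nil s current k start depth sq dq parts bounds h2 h3 h4 h5
    | cons c rs =>
      have hlen1 : rs.length ≤ n := by simp at h1; omega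
      have hd1 : s.drop (k + 1) = rs := by
        have h := congrArg (List.drop 1) h2
        rw [List.drop_drop] at h
        simpa using h
      have hc3 : ((k : Int) + 3) = ((k + 3 : Nat) : Int) := by push_cast; ring
      have hc1 : ((k : Int) + 1) = ((k + 1 : Nat) : Int) := by push_cast; ring
      have hsl : PySem.List.slice s (some (k : Int)) (some ((k : Int) + 3))
          = (c :: rs).take 3 := by
        rw [hc3, PySem.List.slice_natCast, h2]
        congr 1
        omega
      simp only [PySem.List.enumerate_cons, List.foldl_cons]
      rw [pvLoopA.eq_def]
      dsimp only
      simp only [pvStepB, hsl]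
      rw [if_neg (by norm_num : ¬ ((0 : Int) ≠ 0))]
      by_cases g1 : (sq = true ∨ dq = true) ∧ c = '\\'
      · rw [if_pos g1, if_pos g1]
        cases rs with
        | nil =>
          simp only [PySem.List.enumerate_nil, List.foldl_nil]
          have hd2 : s.drop (k + 1) = [] := hd1
          simpa [pvFinish] using
            pv_nil s (current ++ [c]) (k + 1) start depth sq dq parts bounds hd2 (by omega)
              (by rw [h4, pv_take_ext s start k c [] h3 h2]) h5
        | cons d rs2 =>
          simp only [PySem.List.enumerate_cons, List.foldl_cons]
          simp only [pvStepB]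
          rw [if_pos (by norm_num : ((1 : Int) ≠ 0))]
          have hd2 : s.drop (k + 2) = rs2 := by
            have h := congrArg (List.drop 1) hd1
            rw [List.drop_drop] at h
            simpa [show k + 1 + 1 = k + 2 by omega] using h
          have hcur : current ++ [c, d] = (s.drop start).take (k + 2 - start) := by
            rw [show k + 2 = (k + 1) + 1 by omega,
              pv_take_ext s start (k + 1) d rs2 (by omega) hd1,
              pv_take_ext s start k c (d :: rs2) h3 h2, h4]
            simp
          have := IH rs2 (current ++ [c, d]) (k + 2) start depth sq dq parts bounds
            (by simp at h1 ⊢; omega) hd2 (by omega) hcur h5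
          rw [show (k : Int) + 1 + 1 = ((k + 2 : Nat) : Int) by push_cast; ring, this]
          norm_num
      · rw [if_neg g1, if_neg g1]
        by_cases g2 : c = '\'' ∧ dq = false
        · rw [if_pos g2, if_pos g2]
          rw [IH rs (current ++ [c]) (k + 1) start depth (!sq) dq parts bounds hlen1 hd1
            (by omega) (by rw [h4, pv_take_ext s start k c rs h3 h2]) h5]
          rw [hc1]
        · rw [if_neg g2, if_neg g2]
          by_cases g3 : c = '"' ∧ sq = false
          · rw [if_pos g3, if_pos g3]
            rw [IH rs (current ++ [c]) (k + 1) start depth sq (!dq) parts bounds hlen1 hd1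
              (by omega) (by rw [h4, pv_take_ext s start k c rs h3 h2]) h5]
            rw [hc1]
          · rw [if_neg g3, if_neg g3]
            by_cases g4 : c = '[' ∧ sq = false ∧ dq = false
            · rw [if_pos g4, if_pos g4]
              rw [IH rs (current ++ [c]) (k + 1) start (depth + 1) sq dq parts bounds hlen1 hd1
                (by omega) (by rw [h4, pv_take_ext s start k c rs h3 h2]) h5]
              rw [hc1]
            · rw [if_neg g4, if_neg g4]
              by_cases g5 : c = ']' ∧ sq = false ∧ dq = false
              · rw [if_pos g5, if_pos g5]
                rw [IH rs (current ++ [c]) (k + 1) start (depth - 1) sq dq parts bounds hlen1 hd1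
                  (by omega) (by rw [h4, pv_take_ext s start k c rs h3 h2]) h5]
                rw [hc1]
              · rw [if_neg g5, if_neg g5]
                by_cases g6 : c = ' ' ∧ depth = 0 ∧ sq = false ∧ dq = false ∧
                    (c :: rs).take 3 = [' ', '|', ' ']
                · rw [if_pos g6, if_pos g6]
                  obtain ⟨hc, hd0, hsq, hdq, htake⟩ := g6
                  cases rs with
                  | nil => simp at htake
                  | cons d rs2 =>
                    cases rs2 with
                    | nil => simp at htake
                    | cons e rs3 =>
                      simp at htake
                      obtain ⟨hc', hd', he'⟩ := htake
                      subst hc' hd' he'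
                      simp only [PySem.List.enumerate_cons, List.foldl_cons]
                      simp only [pvStepB]
                      rw [if_pos (by norm_num : ((2 : Int) ≠ 0)),
                        if_pos (by norm_num : ((2 : Int) - 1 ≠ 0))]
                      have hd3 : s.drop (k + 3) = rs3 := by
                        have h := congrArg (List.drop 3) h2
                        rw [List.drop_drop] at h
                        simpa [show k + 3 = k + 3 from rfl] using h
                      have hslk : PySem.List.slice s (some (start : Int)) (some (k : Int))
                          = current := by rw [PySem.List.slice_natCast, h4]
                      have hparts : (if PySem.Chars.strip current = [] then parts
                            else parts ++ [String.ofList (PySem.Chars.strip current)])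
                          = (bounds ++ [((start : Int), (k : Int))]).foldl (pvEmitB s) [] := by
                        rw [List.foldl_append, ← h5, List.foldl_cons, List.foldl_nil]
                        simp only [pvEmitB, hslk]
                      have := IH rs3 [] (k + 3) (k + 3) depth sq dq
                        (if PySem.Chars.strip current = [] then parts
                          else parts ++ [String.ofList (PySem.Chars.strip current)])
                        (bounds ++ [((start : Int), (k : Int))])
                        (by simp at h1 ⊢; omega) hd3 (by omega) (by simp) hparts
                      simp only [List.drop_succ_cons, List.drop_zero]
                      rw [show (k : Int) + 1 + 1 + 1 = ((k + 3 : Nat) : Int) by push_cast; ring,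
                        show (k : Int) + 3 = ((k + 3 : Nat) : Int) by push_cast; ring, this]
                      norm_num
                · rw [if_neg g6, if_neg g6]
                  rw [IH rs (current ++ [c]) (k + 1) start depth sq dq parts bounds hlen1 hd1
                    (by omega) (by rw [h4, pv_take_ext s start k c rs h3 h2]) h5]
                  rw [hc1]

-- ===== VERDICT (by name: the statement is the Claim_ definition above) =====
theorem split_union_top_level_py_spec : Claim_equal_split_union_top_level_py := by
  intro t _
  unfold Spec_split_union_top_level_py split_union_top_level_py split_union_top_level_py_alt
  rw [pv_main t.toList t.toList.length t.toList [] 0 0 0 false false [] [] (le_refl _)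
    (by simp) (le_refl _) (by simp) (by simp)]
  rfl
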